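-- pv_equiv track=rewrite | github.com/OlegGasul/Leetcode | remove-colored-pieces-if-both-neighbors-are-the-same-color.py | winnerOfGame
-- ===== SOURCE A (Python) =====
-- def winnerOfGame(colors: str) -> bool:
--     a = 0
--     b = 0
--     aResult = 0
--     bResult = 0
--
--     for i in range(len(colors)):
--         if colors[i] == "A":
--             if b and b >= 3:
--                 bResult += b - 2
--
--             b = 0
--             a += 1
--         elif colors[i] == "B":
--             if a and a >= 3:
--                 aResult += a - 2
--
--             a = 0
--             b += 1
--
--     if a >= 3:
--         aResult += a - 2
--     elif b >= 3:
--         bResult += b - 2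
--
--     return aResult - bResult > 0
-- ===== SOURCE B (Python) =====
-- def winnerOfGame(colors: str) -> bool:
--     s = [c for c in colors if c == 'A' or c == 'B']
--     alice = 0
--     bob = 0
--     for x, y, z in zip(s, s[1:], s[2:]):
--         if x == y == z:
--             if y == 'A':
--                 alice += 1
--             else:
--                 bob += 1
--     return alice > bob
-- ===== Notes on version B (the rewrite author's own statement) =====
-- stated objective: simpler
-- what changed: Replaces A's stateful run-length counters with end-of-run flushes by a sliding-window count of positions whose both neighbours have the same color (each run of length n>=3 contributes exactly n-2 such triples).
import Mathlib
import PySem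

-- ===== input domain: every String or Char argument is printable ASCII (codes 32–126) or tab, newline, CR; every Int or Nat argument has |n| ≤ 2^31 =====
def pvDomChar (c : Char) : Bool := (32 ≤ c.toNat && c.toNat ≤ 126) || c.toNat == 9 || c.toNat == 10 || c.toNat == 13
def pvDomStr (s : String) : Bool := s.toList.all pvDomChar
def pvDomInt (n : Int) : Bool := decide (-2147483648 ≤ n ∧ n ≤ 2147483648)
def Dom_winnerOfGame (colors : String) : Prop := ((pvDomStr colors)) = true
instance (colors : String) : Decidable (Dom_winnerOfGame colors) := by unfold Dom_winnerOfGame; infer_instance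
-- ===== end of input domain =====

-- B replaces A's stateful run-length counters (flushed at run ends) by counting
-- positions whose both neighbours carry the same color; objective: simpler.

-- ===== PORT A =====
-- A's loop body as a step on the state (a, b, aResult, bResult);
-- `for i in range(len(colors))` with `colors[i]` visits exactly the characters
-- of `colors` in order, so the fold over `colors.toList` is exact.
def pvStepA (st : Int × Int × Int × Int) (c : Char) : Int × Int × Int × Int :=
  match st with
  | (a, b, aR, bR) =>
    if c = 'A' then
      (a + 1, 0, aR, if b ≠ 0 ∧ b ≥ 3 then bR + (b - 2) else bR)
    else if c = 'B' then
      (0, b + 1, (if a ≠ 0 ∧ a ≥ 3 then aR + (a - 2) else aR), bR)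
    else st

def winnerOfGame (colors : String) : Bool :=
  match colors.toList.foldl pvStepA (0, 0, 0, 0) with
  | (a, b, aR, bR) =>
    if a ≥ 3 then decide ((aR + (a - 2)) - bR > 0)
    else if b ≥ 3 then decide (aR - (bR + (b - 2)) > 0)
    else decide (aR - bR > 0)

-- ===== PORT B =====
def pvStepB (p : Int × Int) (t : Char × Char × Char) : Int × Int :=
  match t with
  | (x, y, z) =>
    if x = y ∧ y = z then
      (if y = 'A' then (p.1 + 1, p.2) else (p.1, p.2 + 1))
    else p

-- `for x, y, z in zip(s, s[1:], s[2:])` is the fold over `zip s (zip (s.drop 1) (s.drop 2))`.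
def winnerOfGame_alt (colors : String) : Bool :=
  let s := colors.toList.filter (fun c => c = 'A' || c = 'B')
  match (List.zip s (List.zip (s.drop 1) (s.drop 2))).foldl pvStepB (0, 0) with
  | (alice, bob) => decide (alice > bob)

-- ===== PRECONDITION & SPEC =====
def Spec_winnerOfGame (colors : String) (out : Bool) : Prop := out = winnerOfGame_alt colors
instance (colors : String) (out : Bool) : Decidable (Spec_winnerOfGame colors out) := by unfold Spec_winnerOfGame; infer_instance

-- ===== CLAIM (what is proved, stated in full; the proofs are below) =====
def Claim_equal_winnerOfGame : Prop := ∀ (colors : String), Dom_winnerOfGame colors → Spec_winnerOfGame colors (winnerOfGame colors)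

-- ===== LEMMAS AND PROOFS =====

-- recursive triple counter: (number of 'A'-triples, number of non-'A'-triples)
def pvCnt : List Char → Int × Int
  | x :: y :: z :: rest =>
      let r := pvCnt (y :: z :: rest)
      if x = y ∧ y = z then (if y = 'A' then (r.1 + 1, r.2) else (r.1, r.2 + 1)) else r
  | _ => (0, 0)

-- A's final flush applied to a state
def pvFinish (st : Int × Int × Int × Int) : Int × Int :=
  match st with
  | (a, b, aR, bR) =>
    if a ≥ 3 then (aR + (a - 2), bR)
    else if b ≥ 3 then (aR, bR + (b - 2))
    else (aR, bR)

-- A's (a, b) counters while the current run is k copies of p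
def pvRun (p : Char) (k : Nat) : Int × Int :=
  if p = 'A' then ((k : Int), 0) else (0, (k : Int))

theorem pvStepA_skip (st : Int × Int × Int × Int) (c : Char)
    (hA : c ≠ 'A') (hB : c ≠ 'B') : pvStepA st c = st := by
  obtain ⟨a, b, aR, bR⟩ := st
  simp [pvStepA, hA, hB]

-- A's fold ignores characters other than 'A' and 'B'
theorem pvFoldA_filter (l : List Char) (st : Int × Int × Int × Int) :
    l.foldl pvStepA st = (l.filter (fun c => c = 'A' || c = 'B')).foldl pvStepA st := by
  induction l generalizing st with
  | nil => rfl
  | cons c t ih =>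
    by_cases hA : c = 'A'
    · simp [List.filter, hA, ih]
    · by_cases hB : c = 'B'
      · simp [List.filter, hA, hB, ih]
      · simp [List.filter, hA, hB, ih, pvStepA_skip _ _ hA hB]

theorem pvCnt_replicate (c : Char) (k : Nat) :
    pvCnt (List.replicate k c) =
      (if c = 'A' then ((if (k : Int) ≥ 3 then (k : Int) - 2 else 0), 0)
       else (0, (if (k : Int) ≥ 3 then (k : Int) - 2 else 0))) := by
  induction k using Nat.strong_induction_on with
  | _ k ih =>
    match k with
    | 0 => simp [pvCnt]
    | 1 => by_cases hc : c = 'A' <;> simp [pvCnt, List.replicate, hc]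
    | 2 => by_cases hc : c = 'A' <;> simp [pvCnt, List.replicate, hc]
    | (m + 3) =>
      have h2 := ih (m + 2) (by omega)
      have hr : List.replicate (m + 3) c = c :: c :: c :: List.replicate m c := by
        simp [List.replicate_succ]
      have hr2 : (c :: c :: List.replicate m c) = List.replicate (m + 2) c := by
        simp [List.replicate_succ]
      rw [hr]
      simp only [pvCnt]
      rw [hr2, h2]
      by_cases hc : c = 'A' <;>
        simp only [hc, if_pos, if_true, if_neg, ite_true] <;>
        split_ifs <;>
        simp_all [Prod.ext_iff] <;> push_cast <;> omega

theorem pvCnt_boundary (c d : Char) (hcd : c ≠ d) (k : Nat) (t : List Char) :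
    pvCnt (List.replicate k c ++ d :: t) =
      (if c = 'A'
        then ((pvCnt (d :: t)).1 + (if (k : Int) ≥ 3 then (k : Int) - 2 else 0), (pvCnt (d :: t)).2)
        else ((pvCnt (d :: t)).1, (pvCnt (d :: t)).2 + (if (k : Int) ≥ 3 then (k : Int) - 2 else 0))) := by
  induction k using Nat.strong_induction_on with
  | _ k ih =>
    match k with
    | 0 => by_cases hc : c = 'A' <;> simp [hc]
    | 1 =>
      cases t with
      | nil => by_cases hc : c = 'A' <;> simp [pvCnt, hc]
      | cons z rest =>
        by_cases hc : c = 'A'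
        · subst hc; simp [pvCnt, hcd]
        · simp [pvCnt, hc, hcd]
    | 2 =>
      have h1 := ih 1 (by omega)
      have hr : List.replicate 2 c ++ d :: t = c :: (List.replicate 1 c ++ d :: t) := by
        simp [List.replicate_succ]
      rw [hr]
      have hr1 : List.replicate 1 c ++ d :: t = c :: d :: t := by simp [List.replicate_succ]
      rw [hr1]
      simp only [pvCnt, hcd]
      have h1' : pvCnt (c :: d :: t) = pvCnt (List.replicate 1 c ++ d :: t) := by rw [hr1]
      by_cases hc : c = 'A' <;> simp_all [pvCnt, hcd]
    | (m + 3) =>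
      have h2 := ih (m + 2) (by omega)
      have hr : List.replicate (m + 3) c ++ d :: t
          = c :: c :: c :: (List.replicate m c ++ d :: t) := by
        simp [List.replicate_succ]
      have hr2 : (c :: c :: (List.replicate m c ++ d :: t))
          = List.replicate (m + 2) c ++ d :: t := by
        simp [List.replicate_succ]
      rw [hr]
      simp only [pvCnt]
      rw [hr2, h2]
      by_cases hc : c = 'A' <;>
        simp only [hc, if_true, ite_true] <;>
        split_ifs <;>
        simp_all [Prod.ext_iff] <;> push_cast <;> omega

theorem pvMain (s : List Char) (hs : ∀ c ∈ s, c = 'A' ∨ c = 'B') :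
    ∀ (p : Char), (p = 'A' ∨ p = 'B') → ∀ (k : Nat) (r q : Int),
      pvFinish (s.foldl pvStepA ((pvRun p k).1, (pvRun p k).2, r, q))
        = (r + (pvCnt (List.replicate k p ++ s)).1, q + (pvCnt (List.replicate k p ++ s)).2) := by
  induction s with
  | nil =>
    intro p hp k r q
    rcases hp with hp | hp <;>
      subst hp <;>
      simp [pvRun, pvFinish, pvCnt_replicate] <;>
      split_ifs <;> simp_all <;> push_cast <;> omega
  | cons c s' ih =>
    intro p hp k r q
    have hs' : ∀ x ∈ s', x = 'A' ∨ x = 'B' := fun x hx => hs x (List.mem_cons_of_mem _ hx)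
    have hc : c = 'A' ∨ c = 'B' := hs c (by simp)
    rcases hp with hp | hp <;> subst hp <;> rcases hc with hc | hc <;> subst hc
    · -- p = 'A', c = 'A'
      have hstep : pvStepA ((pvRun 'A' k).1, (pvRun 'A' k).2, r, q) 'A'
          = ((pvRun 'A' (k + 1)).1, (pvRun 'A' (k + 1)).2, r, q) := by
        simp [pvStepA, pvRun]
      have happ : List.replicate k 'A' ++ 'A' :: s' = List.replicate (k + 1) 'A' ++ s' := by
        simp [List.replicate_succ']
      simp only [List.foldl_cons, hstep, happ]
      exact ih hs' 'A' (Or.inl rfl) (k + 1) r q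
    · -- p = 'A', c = 'B'
      have hstep : pvStepA ((pvRun 'A' k).1, (pvRun 'A' k).2, r, q) 'B'
          = ((pvRun 'B' 1).1, (pvRun 'B' 1).2,
             r + (if (k : Int) ≥ 3 then (k : Int) - 2 else 0), q) := by
        simp [pvStepA, pvRun]
        split_ifs <;> simp_all <;> push_cast <;> omega
      have hb := pvCnt_boundary 'A' 'B' (by decide) k s'
      have h1 : List.replicate 1 'B' ++ s' = 'B' :: s' := by simp [List.replicate_succ]
      simp only [List.foldl_cons, hstep]
      rw [ih hs' 'B' (Or.inr rfl) 1 _ q, h1, hb]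
      simp
      ring_nf
    · -- p = 'B', c = 'A'
      have hstep : pvStepA ((pvRun 'B' k).1, (pvRun 'B' k).2, r, q) 'A'
          = ((pvRun 'A' 1).1, (pvRun 'A' 1).2,
             r, q + (if (k : Int) ≥ 3 then (k : Int) - 2 else 0)) := by
        simp [pvStepA, pvRun]
        split_ifs <;> simp_all <;> push_cast <;> omega
      have hb := pvCnt_boundary 'B' 'A' (by decide) k s'
      have h1 : List.replicate 1 'A' ++ s' = 'A' :: s' := by simp [List.replicate_succ]
      simp only [List.foldl_cons, hstep]
      rw [ih hs' 'A' (Or.inl rfl) 1 r _, h1, hb]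
      simp
      ring_nf
    · -- p = 'B', c = 'B'
      have hstep : pvStepA ((pvRun 'B' k).1, (pvRun 'B' k).2, r, q) 'B'
          = ((pvRun 'B' (k + 1)).1, (pvRun 'B' (k + 1)).2, r, q) := by
        simp [pvStepA, pvRun]
      have happ : List.replicate k 'B' ++ 'B' :: s' = List.replicate (k + 1) 'B' ++ s' := by
        simp [List.replicate_succ']
      simp only [List.foldl_cons, hstep, happ]
      exact ih hs' 'B' (Or.inr rfl) (k + 1) r q

theorem pvZipFold (s : List Char) (p : Int × Int) :
    (List.zip s (List.zip (s.drop 1) (s.drop 2))).foldl pvStepB p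
      = (p.1 + (pvCnt s).1, p.2 + (pvCnt s).2) := by
  match s with
  | [] => simp [pvCnt]
  | [x] => simp [pvCnt]
  | [x, y] => simp [pvCnt]
  | x :: y :: z :: rest =>
    have ih := pvZipFold (y :: z :: rest) (pvStepB p (x, y, z))
    simp only [List.drop_succ_cons, List.drop_zero, List.zip_cons_cons, List.foldl_cons] at ih ⊢
    rw [ih]
    simp only [pvCnt, pvStepB]
    split_ifs <;> simp_all [Prod.ext_iff] <;> ring
termination_by s.length

theorem pvFinish_decide (st : Int × Int × Int × Int) :
    (match st with
      | (a, b, aR, bR) =>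
        if a ≥ 3 then decide ((aR + (a - 2)) - bR > 0)
        else if b ≥ 3 then decide (aR - (bR + (b - 2)) > 0)
        else decide (aR - bR > 0))
      = decide ((pvFinish st).1 - (pvFinish st).2 > 0) := by
  obtain ⟨a, b, aR, bR⟩ := st
  simp only [pvFinish]
  split_ifs <;> rfl

-- ===== VERDICT (by name: the statement is the Claim_ definition above) =====
theorem winnerOfGame_spec : Claim_equal_winnerOfGame := by
  intro colors _
  unfold Spec_winnerOfGame winnerOfGame winnerOfGame_alt
  set L := colors.toList.filter (fun c => c = 'A' || c = 'B') with hL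
  have hall : ∀ c ∈ L, c = 'A' ∨ c = 'B' := by
    intro c hcm
    rw [hL] at hcm
    have := (List.mem_filter.mp hcm).2
    simpa using this
  have hmain := pvMain L hall 'A' (Or.inl rfl) 0 0 0
  have hrun : ((pvRun 'A' 0).1, (pvRun 'A' 0).2, (0 : Int), (0 : Int))
      = ((0 : Int), (0 : Int), (0 : Int), (0 : Int)) := by simp [pvRun]
  rw [hrun] at hmain
  simp only [List.replicate, List.nil_append, zero_add] at hmain
  rw [pvFoldA_filter, ← hL, pvFinish_decide, hmain]
  simp only [pvZipFold, zero_add]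
  exact decide_eq_decide.mpr (by omega)
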